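-- pv_equiv track=rewrite | github.com/Rsendes/Jogo-do-Moinho-FP | jogo_moinho.py | obter_vetor
-- ===== SOURCE A (Python) =====
-- def obter_coluna_int(col):
--     if col == 'a':
--         return 1
--     elif col == 'b':
--         return 2
--     else:
--         return 3
--
-- def obter_vetor(tab, arg):
--     vetor = []
--     if arg in ['1', '2', '3']:
--         return tuple(tab[int(arg) - 1])
--     else:
--         for e in tab:
--             vetor.append(e[obter_coluna_int(arg) - 1])
--         return tuple(vetor)
-- ===== SOURCE B (Python) =====
-- def obter_vetor(tab, arg):
--     if arg in ('1', '2', '3'):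
--         return tuple(tab[int(arg) - 1])
--     i = {'a': 0, 'b': 1}.get(arg, 2)
--     cols = tuple(zip(*tab))
--     return cols[i] if tab else ()
-- ===== Notes on version B (the rewrite author's own statement) =====
-- stated objective: idiomatic
-- what changed: Column branch replaced: instead of an explicit loop appending e[idx] row by row, B transposes the board with zip(*tab) and selects the column tuple; the letter-to-index mapping becomes a dict lookup instead of an if/elif helper.
import Mathlib
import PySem

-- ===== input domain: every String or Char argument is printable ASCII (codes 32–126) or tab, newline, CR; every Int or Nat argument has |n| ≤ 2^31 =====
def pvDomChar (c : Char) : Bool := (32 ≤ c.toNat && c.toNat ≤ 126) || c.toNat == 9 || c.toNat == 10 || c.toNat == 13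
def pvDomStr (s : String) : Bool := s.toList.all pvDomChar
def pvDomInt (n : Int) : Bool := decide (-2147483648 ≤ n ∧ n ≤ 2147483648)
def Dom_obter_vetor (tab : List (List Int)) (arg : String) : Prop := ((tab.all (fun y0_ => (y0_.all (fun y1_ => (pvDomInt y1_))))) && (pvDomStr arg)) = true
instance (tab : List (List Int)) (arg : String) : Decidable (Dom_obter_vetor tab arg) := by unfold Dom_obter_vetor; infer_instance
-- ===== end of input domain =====

-- B: the column branch transposes the board (zip(*tab)) and selects the column,
-- instead of scanning the rows and appending; same values, idiomatic decomposition.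


-- ===== PORT A =====
def obter_coluna_int (col : String) : Int :=
  if col = "a" then 1 else if col = "b" then 2 else 3

def obter_vetor (tab : List (List Int)) (arg : String) : List Int :=
  if arg = "1" ∨ arg = "2" ∨ arg = "3" then
    (PySem.List.pyGet? tab ((PySem.Int.ofStr? arg).getD 0 - 1)).getD []
  else
    tab.foldl (fun vetor e =>
      vetor ++ [(PySem.List.pyGet? e (obter_coluna_int arg - 1)).getD 0]) []

-- ===== PORT B =====
-- zip(*tab): columns of the board, truncated at the shortest row (exact Python zip semantics)
def pyZipStar (tab : List (List Int)) : List (List Int) :=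
  if _h : tab = [] then []
  else if _h2 : tab.any (·.isEmpty) then []
  else (tab.map (·.headI)) :: pyZipStar (tab.map (·.tail))
termination_by tab.headI.length
decreasing_by
  cases tab with
  | nil => exact absurd rfl _h
  | cons e rest =>
    simp only [List.headI]
    have he : e ≠ [] := by
      intro he; exact _h2 (by simp [he, List.any_cons])
    cases e with
    | nil => exact absurd rfl he
    | cons x xs => simp

def obter_vetor_alt (tab : List (List Int)) (arg : String) : List Int :=
  if arg = "1" ∨ arg = "2" ∨ arg = "3" then
    (PySem.List.pyGet? tab ((PySem.Int.ofStr? arg).getD 0 - 1)).getD []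
  else
    let i : Int := (PySem.Dict.get? (PySem.Dict.ofList [("a", (0 : Int)), ("b", 1)]) arg).getD 2
    if tab = [] then []
    else (PySem.List.pyGet? (pyZipStar tab) i).getD []

-- ===== PRECONDITION & SPEC =====
-- Pre_ excludes exactly the inputs where Python A raises IndexError: a row argument
-- beyond the number of rows, or (column branch) some row shorter than the column index.
def Pre_obter_vetor (tab : List (List Int)) (arg : String) : Prop :=
  if arg = "1" then 1 ≤ tab.length
  else if arg = "2" then 2 ≤ tab.length
  else if arg = "3" then 3 ≤ tab.length
  else ∀ e ∈ tab, (if arg = "a" then 1 else if arg = "b" then 2 else 3) ≤ e.length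
instance (tab : List (List Int)) (arg : String) : Decidable (Pre_obter_vetor tab arg) := by unfold Pre_obter_vetor; infer_instance

def pvWitness_obter_vetor : List (List Int) × String := ([[1, 2, 3], [4, 5, 6], [7, 8, 9]], "b")

def Spec_obter_vetor (tab : List (List Int)) (arg : String) (out : List Int) : Prop := out = obter_vetor_alt tab arg
instance (tab : List (List Int)) (arg : String) (out : List Int) : Decidable (Spec_obter_vetor tab arg out) := by unfold Spec_obter_vetor; infer_instance

-- ===== CLAIM (what is proved, stated in full; the proofs are below) =====
def Claim_equal_obter_vetor : Prop := ∀ (tab : List (List Int)) (arg : String), Dom_obter_vetor tab arg → Pre_obter_vetor tab arg → Spec_obter_vetor tab arg (obter_vetor tab arg)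

-- ===== LEMMAS AND PROOFS =====

-- column i of the zip-transpose is the list of the rows' i-th entries,
-- provided every row reaches index i
lemma zipStar_getElem? (i : Nat) : ∀ (tab : List (List Int)), tab ≠ [] →
    (∀ e ∈ tab, i < e.length) →
    (pyZipStar tab)[i]? = some (tab.map (fun e => e.getD i 0)) := by
  induction i with
  | zero =>
    intro tab hne hlen
    have hno : ¬ tab.any (·.isEmpty) = true := by
      simp only [List.any_eq_true, not_exists]
      rintro e ⟨he, hemp⟩
      have := hlen e he
      cases e <;> simp_all
    rw [pyZipStar, dif_neg hne, dif_neg hno]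
    simp only [List.getElem?_cons_zero]
    congr 1
    apply List.map_congr_left
    intro e he
    have := hlen e he
    cases e <;> simp_all [List.headI]
  | succ n ih =>
    intro tab hne hlen
    have hno : ¬ tab.any (·.isEmpty) = true := by
      simp only [List.any_eq_true, not_exists]
      rintro e ⟨he, hemp⟩
      have := hlen e he
      cases e <;> simp_all
    rw [pyZipStar, dif_neg hne, dif_neg hno]
    simp only [List.getElem?_cons_succ]
    rw [ih (tab.map (·.tail))]
    · congr 1
      rw [List.map_map]
      apply List.map_congr_left
      intro e he
      have hlt := hlen e he
      cases e with
      | nil => simp at hlt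
      | cons x xs =>
        simp only [Function.comp, List.tail_cons, List.getD, List.getElem?_cons_succ]
    · cases tab <;> simp_all
    · intro t ht
      rw [List.mem_map] at ht
      obtain ⟨e, he, rfl⟩ := ht
      have hlt := hlen e he
      cases e with
      | nil => simp at hlt
      | cons x xs => simp at hlt ⊢; omega

-- the column branches of the two ports agree when every row reaches the column index
lemma col_eq (tab : List (List Int)) (i : Nat) (h : ∀ e ∈ tab, i < e.length) :
    tab.foldl (fun vetor e => vetor ++ [(PySem.List.pyGet? e (i : Int)).getD 0]) []
      = if tab = [] then [] else (PySem.List.pyGet? (pyZipStar tab) (i : Int)).getD [] := by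
  by_cases hne : tab = []
  · simp [hne]
  · rw [if_neg hne, PySem.List.pyGet?_natCast, zipStar_getElem? i tab hne h]
    rw [PySem.List.foldl_append_singleton_eq_map, List.nil_append, Option.getD_some]
    apply List.map_congr_left
    intro e he
    have hlt := h e he
    rw [PySem.List.pyGet?_natCast]
    simp [List.getD, List.getElem?_eq_getElem hlt]

-- ===== VERDICT (by name: the statement is the Claim_ definition above) =====
theorem obter_vetor_spec : Claim_equal_obter_vetor := by
  intro tab arg _ hpre
  unfold Spec_obter_vetor obter_vetor obter_vetor_alt
  by_cases hrow : arg = "1" ∨ arg = "2" ∨ arg = "3"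
  · simp [hrow]
  · rw [if_neg hrow, if_neg hrow]
    unfold Pre_obter_vetor at hpre
    have h1 : arg ≠ "1" := by rintro rfl; exact hrow (Or.inl rfl)
    have h2 : arg ≠ "2" := by rintro rfl; exact hrow (Or.inr (Or.inl rfl))
    have h3 : arg ≠ "3" := by rintro rfl; exact hrow (Or.inr (Or.inr rfl))
    rw [if_neg h1, if_neg h2, if_neg h3] at hpre
    by_cases ha : arg = "a"
    · subst ha
      have := col_eq tab 0 (by intro e he; have := hpre e he; simp at this ⊢; omega)
      simpa [obter_coluna_int, PySem.Dict.get?] using this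
    · by_cases hb : arg = "b"
      · subst hb
        have := col_eq tab 1 (by intro e he; have := hpre e he; simp at this ⊢; omega)
        simpa [obter_coluna_int, PySem.Dict.get?] using this
      · have ha' : (("a" : String) == arg) = false := beq_eq_false_iff_ne.mpr (fun h => ha h.symm)
        have hb' : (("b" : String) == arg) = false := beq_eq_false_iff_ne.mpr (fun h => hb h.symm)
        have hget : (PySem.Dict.get? (PySem.Dict.ofList [("a", (0 : Int)), ("b", 1)]) arg).getD 2 = 2 := by
          simp [show PySem.Dict.ofList [("a", (0 : Int)), ("b", 1)] = PySem.Dict.mk [("a", 0), ("b", 1)] from rfl,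
                PySem.Dict.get?, ha', hb']
        have := col_eq tab 2 (by intro e he; have := hpre e he; simp [ha, hb] at this ⊢; omega)
        simpa [obter_coluna_int, hget, ha, hb] using this
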